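-- pv_equiv track=rewrite | github.com/sanskrit-lexicon/PWK | pw_ls/pw_ls_AB/diffls4a.py | match_helper_v0
-- ===== SOURCE A (Python) =====
-- def match_helper_v0(a,b,a_used,b_used):
--  a_match = []
--  for i,x in enumerate(a):
--   b_avail = [j for j in range(len(b)) if (not b_used[j]) and (x == b[j])]
--   if b_avail == []:
--    # x not matched
--    a_match.append(None)
--   else:
--    # use first match
--    j = b_avail[0]
--    a_match.append(j)
--    a_used[i] = j
--    b_used[j] = i
--  return a_match
-- ===== SOURCE B (Python) =====
-- def match_helper_v0(a, b, a_used, b_used):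
--     # Stage 1: one pass over b builds value -> increasing list of available positions.
--     avail = {}
--     for j, y in enumerate(b):
--         if not b_used[j]:
--             avail.setdefault(y, []).append(j)
--     # Stage 2: one pass over a computes each element's occurrence rank among equals.
--     seen = {}
--     occ = []
--     for x in a:
--         k = seen.get(x, 0)
--         seen[x] = k + 1
--         occ.append(k)
--     # Stage 3: the k-th occurrence of value x is matched to the k-th available
--     # position holding x (greedy first-unused-equal matching), else None.
--     a_match = [avail[x][k] if k < len(avail.get(x, ())) else None
--                for x, k in zip(a, occ)]
--     # Stage 4: record the matches in the used-arrays (same observable writes as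
--     # the original outside the stated difference region).
--     for i, j in enumerate(a_match):
--         if j is not None:
--             a_used[i] = j
--             b_used[j] = i
--     return a_match
-- ===== Notes on version B (the rewrite author's own statement) =====
-- stated objective: faster
-- what changed: Instead of rescanning all of b for every a element, B works in staged passes: it groups the available b positions by value, computes each a element's occurrence rank among equal elements, and matches the k-th occurrence of x to the k-th available position of x by a pure lookup, so the inner scan disappears.
-- intended difference: When the first a element is matched (to position j0) and a later a element equals a[0], A marks j0 with b_used[j0]=0, which is falsy, so A hands out j0 a second time to the first such duplicate; B consumes j0 once and gives the duplicate the next available position or None, which is the intended one-to-one matching. — e.g. on match_helper_v0([1, 1], [1], [none, none], [none]): A returns [some 0, some 0], B returns [some 0, none]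
-- outside the precondition, e.g. on match_helper_v0([5], [], [], []): A returns [None], B returns [None]; on match_helper_v0([], [1], [], []): A returns [], B raises IndexError
import Mathlib
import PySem

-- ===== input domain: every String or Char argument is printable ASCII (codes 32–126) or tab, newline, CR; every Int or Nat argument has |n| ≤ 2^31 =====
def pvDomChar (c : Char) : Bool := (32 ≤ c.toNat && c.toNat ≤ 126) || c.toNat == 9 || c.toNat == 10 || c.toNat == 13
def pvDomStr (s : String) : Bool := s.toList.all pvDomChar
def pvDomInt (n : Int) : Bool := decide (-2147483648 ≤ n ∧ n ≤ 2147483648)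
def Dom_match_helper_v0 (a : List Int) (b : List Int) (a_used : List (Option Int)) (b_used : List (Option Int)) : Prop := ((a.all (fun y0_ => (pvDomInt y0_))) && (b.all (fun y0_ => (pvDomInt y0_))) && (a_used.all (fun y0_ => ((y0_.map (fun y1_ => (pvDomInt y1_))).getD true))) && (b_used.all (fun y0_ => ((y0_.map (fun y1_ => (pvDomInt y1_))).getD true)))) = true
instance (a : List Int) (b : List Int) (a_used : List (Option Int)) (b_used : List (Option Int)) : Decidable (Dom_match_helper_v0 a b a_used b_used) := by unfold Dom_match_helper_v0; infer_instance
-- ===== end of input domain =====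

-- B replaces A's per-element rescan of b by staged passes: group available b positions by value,
-- rank each a element among its equals, then match the k-th occurrence of x to the k-th available
-- position of x by a pure lookup (objective: faster). Both Pythons mutate a_used/b_used in place;
-- outside D_ the writes coincide, and the theorems are about the RETURN value only.

-- ===== PORT A =====
-- Python truthiness of an Optional[int] cell: None and 0 are falsy.
def pyFalsy (v : Option Int) : Bool :=
  match v with
  | none => true
  | some k => k == 0

-- the list comprehension [j for j in range(len(b)) if (not b_used[j]) and (x == b[j])]
-- (j ranges over 0..len b, so plain Nat indexing is exact here)
def availA (b : List Int) (bU : List (Option Int)) (x : Int) : List Nat :=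
  (List.range b.length).filter (fun j => pyFalsy (bU.getD j none) && (b.getD j 0 == x))

-- the 'for i,x in enumerate(a)' loop, state = (i, a_used, b_used), emitting a_match in order
def loopA (b : List Int) : List Int → Nat → List (Option Int) → List (Option Int) → List (Option Int)
  | [], _, _, _ => []
  | x :: rest, i, aU, bU =>
    match availA b bU x with
    | [] => none :: loopA b rest (i + 1) aU bU
    | j :: _ => some (j : Int) :: loopA b rest (i + 1) (aU.set i (some (j : Int))) (bU.set j (some (i : Int)))

def match_helper_v0 (a : List Int) (b : List Int) (a_used : List (Option Int)) (b_used : List (Option Int)) : List (Option Int) :=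
  loopA b a 0 a_used b_used

-- ===== PORT B =====
-- Stage 1: for j, y in enumerate(b): if not b_used[j]: avail.setdefault(y, []).append(j)
-- (setdefault-then-append ported as Dict.modify with default [])
def buildAvail (b : List Int) (bU : List (Option Int)) : PySem.Dict Int (List Nat) :=
  (List.range b.length).foldl
    (fun d j =>
      if pyFalsy (bU.getD j none) then d.modify (b.getD j 0) [] (· ++ [j]) else d)
    PySem.Dict.empty

-- Stage 2: occurrence rank of each a element among equal earlier elements
def occRanks : List Int → PySem.Dict Int Nat → List Nat
  | [], _ => []
  | x :: rest, seen => seen.getD x 0 :: occRanks rest (seen.insert x (seen.getD x 0 + 1))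

-- Stage 3: the zip/map comprehension (Stage 4's used-array writes do not affect the return value)
def match_helper_v0_alt (a : List Int) (b : List Int) (a_used : List (Option Int)) (b_used : List (Option Int)) : List (Option Int) :=
  (a.zip (occRanks a PySem.Dict.empty)).map (fun p =>
    if p.2 < ((buildAvail b b_used).getD p.1 []).length
    then some ((((buildAvail b b_used).getD p.1 []).getD p.2 0 : Nat) : Int)
    else none)

-- ===== PRECONDITION & SPEC =====
-- A raises IndexError when a matched index i reaches past a_used or when len(b_used) < len(b);
-- Pre_ states the calling convention len(a) ≤ len(a_used) ∧ len(b) ≤ len(b_used). It also excludes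
-- some inputs on which A happens to return (a too-short a_used that no match ever indexes, or a
-- too-short b_used with a = [], where B's precomputation over b still raises) — see the cites.
def Pre_match_helper_v0 (a : List Int) (b : List Int) (a_used : List (Option Int)) (b_used : List (Option Int)) : Prop :=
  a.length ≤ a_used.length ∧ b.length ≤ b_used.length
instance (a : List Int) (b : List Int) (a_used : List (Option Int)) (b_used : List (Option Int)) : Decidable (Pre_match_helper_v0 a b a_used b_used) := by unfold Pre_match_helper_v0; infer_instance

def pvWitness_match_helper_v0 : List Int × List Int × List (Option Int) × List (Option Int) :=
  ([1, 2, 1], [2, 1, 1], [none, none, none], [none, some 3, none])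

-- When the first a element is matched (to position j0) and a later a element equals a[0], A marks
-- j0 with b_used[j0]=0, which is falsy, so A hands out j0 a second time to the first such
-- duplicate; B consumes j0 once and gives the duplicate the next available position or None,
-- which is the intended one-to-one matching.
def D_match_helper_v0 (a : List Int) (b : List Int) (a_used : List (Option Int)) (b_used : List (Option Int)) : Prop :=
  a ≠ [] ∧ a.headD 0 ∈ a.tail ∧
    ((List.range b.length).any (fun j => pyFalsy (b_used.getD j none) && (b.getD j 0 == a.headD 0))) = true
instance (a : List Int) (b : List Int) (a_used : List (Option Int)) (b_used : List (Option Int)) : Decidable (D_match_helper_v0 a b a_used b_used) := by unfold D_match_helper_v0; infer_instance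

def Spec_match_helper_v0 (a : List Int) (b : List Int) (a_used : List (Option Int)) (b_used : List (Option Int)) (out : List (Option Int)) : Prop :=
  ¬ D_match_helper_v0 a b a_used b_used → out = match_helper_v0_alt a b a_used b_used
instance (a : List Int) (b : List Int) (a_used : List (Option Int)) (b_used : List (Option Int)) (out : List (Option Int)) : Decidable (Spec_match_helper_v0 a b a_used b_used out) := by unfold Spec_match_helper_v0; infer_instance

def pvDiffWitness_match_helper_v0 : List Int × List Int × List (Option Int) × List (Option Int) :=
  ([1, 1], [1], [none, none], [none])

def pvDiffWitnessOut_match_helper_v0 : (List (Option Int)) × (List (Option Int)) :=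
  ([some 0, some 0], [some 0, none])

-- ===== CLAIM (what is proved, stated in full; the proofs are below) =====
def Claim_unchanged_match_helper_v0 : Prop := ∀ (a : List Int) (b : List Int) (a_used : List (Option Int)) (b_used : List (Option Int)), Dom_match_helper_v0 a b a_used b_used → Pre_match_helper_v0 a b a_used b_used → Spec_match_helper_v0 a b a_used b_used (match_helper_v0 a b a_used b_used)

def Claim_changed_match_helper_v0 : Prop := Dom_match_helper_v0 (pvDiffWitness_match_helper_v0.1) (pvDiffWitness_match_helper_v0.2.1) (pvDiffWitness_match_helper_v0.2.2.1) (pvDiffWitness_match_helper_v0.2.2.2) ∧ Pre_match_helper_v0 (pvDiffWitness_match_helper_v0.1) (pvDiffWitness_match_helper_v0.2.1) (pvDiffWitness_match_helper_v0.2.2.1) (pvDiffWitness_match_helper_v0.2.2.2) ∧ D_match_helper_v0 (pvDiffWitness_match_helper_v0.1) (pvDiffWitness_match_helper_v0.2.1) (pvDiffWitness_match_helper_v0.2.2.1) (pvDiffWitness_match_helper_v0.2.2.2) ∧ match_helper_v0 (pvDiffWitness_match_helper_v0.1) (pvDiffWitness_match_helper_v0.2.1) (pvDiffWitness_match_helper_v0.2.2.1)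 (pvDiffWitness_match_helper_v0.2.2.2) = pvDiffWitnessOut_match_helper_v0.1 ∧ match_helper_v0_alt (pvDiffWitness_match_helper_v0.1) (pvDiffWitness_match_helper_v0.2.1) (pvDiffWitness_match_helper_v0.2.2.1) (pvDiffWitness_match_helper_v0.2.2.2) = pvDiffWitnessOut_match_helper_v0.2 ∧ pvDiffWitnessOut_match_helper_v0.1 ≠ pvDiffWitnessOut_match_helper_v0.2

-- ===== LEMMAS AND PROOFS =====

-- the cell written at index j, read back / read elsewhere
theorem getD_set_self {l : List (Option Int)} {j : Nat} (v : Option Int) (h : j < l.length) :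
    (l.set j v).getD j none = v := by
  simp [List.getD_eq_getElem?_getD, h]

theorem getD_set_ne {l : List (Option Int)} {j m : Nat} (v : Option Int) (h : m ≠ j) :
    (l.set j v).getD m none = l.getD m none := by
  simp [List.getD_eq_getElem?_getD, List.getElem?_set_ne (Ne.symm h)]

-- generalisation of the buildAvail fold over any prefix list of indices
theorem buildAux (b : List Int) (bU : List (Option Int)) (x : Int) :
    ∀ (l : List Nat) (d : PySem.Dict Int (List Nat)),
      (l.foldl
        (fun d j =>
          if pyFalsy (bU.getD j none) then d.modify (b.getD j 0) [] (· ++ [j]) else d) d).getD x []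
        = d.getD x [] ++ l.filter (fun j => pyFalsy (bU.getD j none) && (b.getD j 0 == x))
  | [], d => by simp
  | j :: l, d => by
    rw [List.foldl_cons, List.filter_cons, buildAux b bU x l]
    by_cases hf : pyFalsy (bU.getD j none)
    · rw [if_pos hf, PySem.Dict.getD_modify]
      by_cases hx : b.getD j 0 = x
      · rw [if_pos hx.symm,
          if_pos (by rw [List.getD_eq_getElem?_getD] at hf hx ⊢; simp [hf, hx])]
        rw [hx, List.append_assoc]
        rfl
      · rw [if_neg (fun h => hx h.symm),
          if_neg (by rw [List.getD_eq_getElem?_getD] at hx ⊢; simp [hx])]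
    · rw [if_neg hf, if_neg (by rw [List.getD_eq_getElem?_getD] at hf ⊢; simp [hf])]

-- buildAvail's queue for x is exactly A's availability list over the untouched b_used
theorem getD_buildAvail (b : List Int) (bU : List (Option Int)) (x : Int) :
    (buildAvail b bU).getD x [] = availA b bU x := by
  rw [buildAvail, buildAux b bU x, PySem.Dict.getD_empty]
  rfl

-- the head of an availability list is a valid b index carrying the looked-up value
theorem head_avail {b : List Int} {bU : List (Option Int)} {x : Int} {j : Nat} {t : List Nat}
    (hA : availA b bU x = j :: t) : j < b.length ∧ b.getD j 0 = x := by
  have hm : j ∈ availA b bU x := by rw [hA]; exact List.mem_cons_self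
  rw [availA, List.mem_filter] at hm
  refine ⟨List.mem_range.mp hm.1, ?_⟩
  have := hm.2
  simp only [Bool.and_eq_true, beq_iff_eq] at this
  exact this.2

-- removing the head of a filtered nodup list by falsifying the predicate exactly there
theorem filter_erase_head {l : List Nat} (hnd : l.Nodup) {p p' : Nat → Bool} {j : Nat} {t : List Nat}
    (hj : p' j = false) (hother : ∀ m, m ≠ j → p' m = p m) (hfil : l.filter p = j :: t) :
    l.filter p' = t := by
  have h1 : l.filter p' = (l.filter p).filter (fun m => decide (m ≠ j)) := by
    rw [List.filter_filter]
    refine List.filter_congr ?_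
    intro m _
    by_cases hm : m = j
    · subst hm; simp [hj]
    · simp [hother m hm, hm]
  have hjt : j ∉ t := by
    have := List.Nodup.filter p hnd
    rw [hfil] at this
    exact (List.nodup_cons.mp this).1
  rw [h1, hfil, List.filter_cons]
  have hcond : (decide (j ≠ j)) = false := by simp
  rw [hcond]
  simp only [Bool.false_eq_true, if_false]
  exact List.filter_eq_self.mpr (fun m hm => by simp; exact fun h => hjt (h ▸ hm))

-- a write at index j (with b[j] = x ≠ y) does not change y's availability list
theorem availA_set_ne {b : List Int} {bU : List (Option Int)} {j : Nat} (v : Option Int)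
    {x y : Int} (hbj : b.getD j 0 = x) (hne : y ≠ x) :
    availA b (bU.set j v) y = availA b bU y := by
  unfold availA
  refine List.filter_congr ?_
  intro m _
  by_cases hm : m = j
  · subst hm
    rw [hbj, beq_eq_false_iff_ne.mpr (Ne.symm hne)]
    simp
  · rw [getD_set_ne v hm]

-- a truthy write at the head of x's availability list pops exactly that head
theorem availA_set_head {b : List Int} {bU : List (Option Int)} {x : Int} {j : Nat} {t : List Nat}
    (hA : availA b bU x = j :: t) (hlen : b.length ≤ bU.length) (v : Option Int)
    (hv : pyFalsy v = false) :
    availA b (bU.set j v) x = t := by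
  have hj := head_avail hA
  refine filter_erase_head (List.nodup_range) ?_ ?_ hA
  · rw [getD_set_self v (by omega)]
    simp [hv]
  · intro m hm
    rw [getD_set_ne v hm]

-- the B-side lookup table, abbreviated for the invariant proofs
def lookupB (avail : PySem.Dict Int (List Nat)) (p : Int × Nat) : Option Int :=
  if p.2 < (avail.getD p.1 []).length
  then some (((avail.getD p.1 []).getD p.2 0 : Nat) : Int)
  else none

-- invariant-preserving equality of A's loop with B's rank-and-lookup map, for loop indices i ≥ 1
theorem loop_eq (b : List Int) (avail : PySem.Dict Int (List Nat)) :
    ∀ (rest : List Int) (i : Nat) (aU bU : List (Option Int)) (seen : PySem.Dict Int Nat),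
      1 ≤ i → b.length ≤ bU.length →
      (∀ x ∈ rest, availA b bU x = (avail.getD x []).drop (seen.getD x 0)) →
      loopA b rest i aU bU = (rest.zip (occRanks rest seen)).map (lookupB avail) := by
  intro rest
  induction rest with
  | nil => intro _ _ _ _ _ _ _; rfl
  | cons x rest ih =>
    intro i aU bU seen hi hlen H
    have hx := H x List.mem_cons_self
    set k := seen.getD x 0 with hk
    set q := avail.getD x [] with hq
    simp only [loopA, occRanks, List.zip_cons_cons, List.map_cons]
    cases hA : availA b bU x with
    | nil =>
      have hdrop : q.drop k = [] := by rw [← hx, hA]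
      have hklen : ¬ (k < q.length) := by
        intro hlt
        have := List.length_drop (l := q) (i := k)
        rw [hdrop] at this
        simp at this
        omega
      have hhead : lookupB avail (x, k) = none := by
        simp [lookupB, ← hq, hklen]
      rw [hhead]
      show none :: loopA b rest (i + 1) aU bU = _
      refine congrArg _ ?_
      refine ih (i + 1) aU bU (seen.insert x (k + 1)) (by omega) hlen ?_
      intro y hy
      by_cases hyx : y = x
      · subst hyx
        rw [hA, PySem.Dict.getD_insert_self, ← hq]
        have : q.drop (k + 1) = [] := by
          have := congrArg (List.drop 1) hdrop
          rw [List.drop_drop] at this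
          simpa using this
        rw [this]
      · rw [PySem.Dict.getD_insert_of_ne seen _ _ hyx]
        exact H y (List.mem_cons_of_mem x hy)
    | cons j t =>
      have hdrop : q.drop k = j :: t := by rw [← hx, hA]
      have hja := head_avail hA
      have hklen : k < q.length := by
        by_contra h
        rw [List.drop_eq_nil_of_le (by omega)] at hdrop
        simp at hdrop
      have hgd : q[k]'hklen = j := by
        have h0 : (q.drop k)[0]'(by rw [hdrop]; simp) = j := by simp [hdrop]
        rw [List.getElem_drop] at h0
        simpa using h0
      have hhead : lookupB avail (x, k) = some (j : Int) := by
        simp [lookupB, ← hq, hklen, List.getD_eq_getElem?_getD, hgd]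
      rw [hhead]
      show some (j : Int) :: loopA b rest (i + 1) (aU.set i (some (j : Int))) (bU.set j (some (i : Int))) = _
      refine congrArg _ ?_
      refine ih (i + 1) _ _ (seen.insert x (k + 1)) (by omega)
        (by rw [List.length_set]; exact hlen) ?_
      intro y hy
      by_cases hyx : y = x
      · subst hyx
        have hset : availA b (bU.set j (some (i : Int))) y = t := by
          refine availA_set_head hA hlen (some (i : Int)) ?_
          simp only [pyFalsy]
          simp
          omega
        rw [hset, PySem.Dict.getD_insert_self, ← hq]
        have : q.drop (k + 1) = t := by
          have := congrArg (List.drop 1) hdrop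
          rw [List.drop_drop] at this
          simpa using this
        rw [this]
      · rw [availA_set_ne (some (i : Int)) hja.2 hyx,
          PySem.Dict.getD_insert_of_ne seen _ _ hyx]
        exact H y (List.mem_cons_of_mem x hy)

-- availA is nonempty exactly when D_'s any-scan fires
theorem availA_ne_nil_iff_any (b : List Int) (bU : List (Option Int)) (x : Int) :
    availA b bU x ≠ [] ↔
      ((List.range b.length).any (fun j => pyFalsy (bU.getD j none) && (b.getD j 0 == x))) = true := by
  unfold availA
  rw [Ne, List.filter_eq_nil_iff, List.any_eq_true]
  push Not
  simp

-- B's map is A's map with the lookup table read through lookupB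
theorem alt_eq_map (a b : List Int) (aU bU : List (Option Int)) :
    match_helper_v0_alt a b aU bU
      = (a.zip (occRanks a PySem.Dict.empty)).map (lookupB (buildAvail b bU)) := rfl

-- ===== VERDICT (by name: the statement is the Claim_ definition above) =====
theorem match_helper_v0_spec : Claim_unchanged_match_helper_v0 := by
  intro a b aU bU _ hPre hnD
  obtain ⟨hPa, hPb⟩ := hPre
  rw [alt_eq_map]
  cases a with
  | nil => rfl
  | cons x rest =>
    have hD' : x ∉ rest ∨ availA b bU x = [] := by
      by_cases hmem : x ∈ rest
      · right
        by_contra hne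
        refine hnD ?_
        unfold D_match_helper_v0
        refine ⟨List.cons_ne_nil x rest, by simpa using hmem, ?_⟩
        have := (availA_ne_nil_iff_any b bU x).mp hne
        simpa using this
      · left; exact hmem
    have hbuild := getD_buildAvail b bU
    show loopA b (x :: rest) 0 aU bU = _
    simp only [loopA, occRanks, List.zip_cons_cons, List.map_cons]
    cases hA : availA b bU x with
    | nil =>
      have hhead : lookupB (buildAvail b bU) (x, (PySem.Dict.empty : PySem.Dict Int Nat).getD x 0) = none := by
        simp [lookupB, hbuild x, hA]
      rw [hhead]
      show none :: loopA b rest 1 aU bU = _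
      refine congrArg _ ?_
      refine loop_eq b (buildAvail b bU) rest 1 aU bU _ (le_refl 1) hPb ?_
      intro y hy
      by_cases hyx : y = x
      · subst hyx
        rw [hA, PySem.Dict.getD_insert_self, hbuild y, hA]
        simp
      · rw [PySem.Dict.getD_insert_of_ne _ _ _ hyx, PySem.Dict.getD_empty,
          hbuild y]
        simp
    | cons j t =>
      have hxr : x ∉ rest := by
        rcases hD' with h | h
        · exact h
        · rw [h] at hA; cases hA
      have hja := head_avail hA
      have hd0 : (buildAvail b bU).getD x [] = j :: t := by rw [hbuild x, hA]
      have hhead : lookupB (buildAvail b bU) (x, (PySem.Dict.empty : PySem.Dict Int Nat).getD x 0) = some (j : Int) := by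
        simp [lookupB, hd0]
      rw [hhead]
      show some (j : Int) :: loopA b rest 1 (aU.set 0 (some (j : Int))) (bU.set j (some ((0 : Nat) : Int))) = _
      refine congrArg _ ?_
      refine loop_eq b (buildAvail b bU) rest 1 _ _ _ (le_refl 1)
        (by rw [List.length_set]; exact hPb) ?_
      intro y hy
      have hyx : y ≠ x := fun h => hxr (h ▸ hy)
      rw [availA_set_ne (some ((0 : Nat) : Int)) hja.2 hyx,
        PySem.Dict.getD_insert_of_ne _ _ _ hyx, PySem.Dict.getD_empty,
        hbuild y]
      simp

theorem match_helper_v0_changed : Claim_changed_match_helper_v0 := by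
  unfold Claim_changed_match_helper_v0; decide
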